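-- pv_equiv track=rewrite | github.com/HibaIBegum/Codility_Python | numTimesBlue.py | solution
-- ===== SOURCE A (Python) =====
-- def solution(A):
--
--     R=-1
--     C=0
--     N=len(A)
--     for i in range(N):
--         if A[i]>R:
--             R=A[i]
--         if R==i+1:
--             C+=1
--     return C
-- ===== SOURCE B (Python) =====
-- def solution(A):
--     # Interval-marking algorithm: max(A[:k]) == k  iff  value k occurs among the
--     # first k elements AND no earlier element exceeds k.  Each element A[j] > k
--     # with j < k "spoils" exactly the prefixes k in [j+1, A[j]-1]; mark those
--     # intervals in a difference array, then sweep k = 1..N counting clean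
--     # prefixes that contain their own length.
--     N = len(A)
--     bad = [0] * (N + 2)      # difference array of spoiled-interval marks
--     has = [False] * (N + 1)  # has[k]: value k occurs among the first k elements
--     for j in range(N):
--         v = A[j]
--         if 1 <= v <= N and j < v:
--             has[v] = True
--         lo = j + 1
--         hi = min(v - 1, N)
--         if lo <= hi:
--             bad[lo] += 1
--             bad[hi + 1] -= 1
--     count = 0
--     active = 0
--     for k in range(1, N + 1):
--         active += bad[k]
--         if active == 0 and has[k]:
--             count += 1
--     return count
-- ===== Notes on version B (the rewrite author's own statement) =====
-- stated objective: alternative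
-- what changed: Replaces A's running-maximum scan with an interval-marking algorithm: each element A[j] spoils the prefixes k in [j+1, A[j]-1], which B marks in a difference array; a second array records which prefix lengths occur inside their own prefix; a final sweep counts unspoiled prefixes that contain their own length.
import Mathlib
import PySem

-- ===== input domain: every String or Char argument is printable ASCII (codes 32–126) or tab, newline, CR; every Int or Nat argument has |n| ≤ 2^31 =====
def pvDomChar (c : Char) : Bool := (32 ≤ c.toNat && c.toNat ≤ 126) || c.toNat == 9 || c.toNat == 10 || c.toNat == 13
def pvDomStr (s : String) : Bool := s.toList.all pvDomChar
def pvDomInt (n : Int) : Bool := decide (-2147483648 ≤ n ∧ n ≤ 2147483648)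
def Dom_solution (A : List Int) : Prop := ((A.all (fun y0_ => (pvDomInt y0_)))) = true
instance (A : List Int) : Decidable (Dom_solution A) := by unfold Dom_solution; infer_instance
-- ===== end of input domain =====

-- B replaces A's running-maximum scan by a different algorithm: each element A[j] spoils the prefixes k in [j+1, A[j]-1]; B marks these intervals in a difference array, records which prefixes contain their own length, and sweeps k = 1..N (alternative algorithm, same O(n) cost).


-- ===== PORT A =====
-- for i in range(N): R = max(R, A[i]); count when R == i+1 (fused loop, pair state)
def solution (A : List Int) : Int :=
  (((PySem.List.pyRange 0 (A.length : Int) 1).foldl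
      (fun (st : Int × Int) (i : Int) =>
        let a := PySem.List.pyGetD A i 0
        let R := if a > st.1 then a else st.1
        (R, if R = i + 1 then st.2 + 1 else st.2)) ((-1 : Int), (0 : Int)))).2

-- ===== PORT B =====
-- pass 1: mark spoiled intervals [j+1, min(A[j]-1, N)] in a difference array `bad`
--         and record in `has` which lengths occur inside their own prefix;
-- pass 2: sweep k = 1..N with the running interval count, counting clean prefixes with has[k]
def solution_alt (A : List Int) : Int :=
  let N : Int := (A.length : Int)
  let p1 := (PySem.List.pyRange 0 N 1).foldl
    (fun (st : List Int × List Bool) (j : Int) =>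
      let v := PySem.List.pyGetD A j 0
      let has := if 1 ≤ v ∧ v ≤ N ∧ j < v then PySem.List.pySetD st.2 v true else st.2
      let lo := j + 1
      let hi := min (v - 1) N
      let bad :=
        if lo ≤ hi then
          let b1 := PySem.List.pySetD st.1 lo (PySem.List.pyGetD st.1 lo 0 + 1)
          PySem.List.pySetD b1 (hi + 1) (PySem.List.pyGetD b1 (hi + 1) 0 - 1)
        else st.1
      (bad, has))
    (List.replicate (A.length + 2) (0 : Int), List.replicate (A.length + 1) false)
  ((PySem.List.pyRange 1 (N + 1) 1).foldl
    (fun (st : Int × Int) (k : Int) =>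
      let active := st.2 + PySem.List.pyGetD p1.1 k 0
      (if active = 0 ∧ PySem.List.pyGetD p1.2 k false = true then st.1 + 1 else st.1, active))
    ((0 : Int), (0 : Int))).1

-- ===== PRECONDITION & SPEC =====
def Spec_solution (A : List Int) (out : Int) : Prop := out = solution_alt A
instance (A : List Int) (out : Int) : Decidable (Spec_solution A out) := by unfold Spec_solution; infer_instance

-- ===== CLAIM (what is proved, stated in full; the proofs are below) =====
def Claim_equal_solution : Prop := ∀ (A : List Int), Dom_solution A → Spec_solution A (solution A)

-- ===== LEMMAS AND PROOFS =====

-- the difference-array contribution of element j at cell m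
def evd (A : List Int) (j m : Nat) : Int :=
  (if (j : Int) + 1 ≤ min (A.getD j 0 - 1) (A.length : Int) ∧ (m : Int) = (j : Int) + 1
    then (1 : Int) else 0)
  - (if (j : Int) + 1 ≤ min (A.getD j 0 - 1) (A.length : Int) ∧ (m : Int) = min (A.getD j 0 - 1) (A.length : Int) + 1
    then (1 : Int) else 0)

-- value of bad[m] after processing the first t elements
def badVal (A : List Int) (t m : Nat) : Int := ∑ j ∈ Finset.range t, evd A j m

-- value of has[m] after processing the first t elements
def hasVal (A : List Int) (t m : Nat) : Bool :=
  decide (∃ j < t, 1 ≤ A.getD j 0 ∧ A.getD j 0 ≤ (A.length : Int) ∧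
    (j : Int) < A.getD j 0 ∧ A.getD j 0 = (m : Int))

-- running interval count after the first k sweep steps
def activeVal (A : List Int) (k : Nat) : Int :=
  ∑ m ∈ Finset.range k, badVal A A.length (m + 1)

-- count after the first k sweep steps
def countVal (A : List Int) (k : Nat) : Int :=
  ∑ m ∈ Finset.range k,
    (if activeVal A (m + 1) = 0 ∧ hasVal A A.length (m + 1) = true then (1 : Int) else 0)

-- A's loop, structurally
def cntA : List Int → Int → Int → Int
  | [], _, _ => 0
  | x :: xs, s, R =>
      (if (if x > R then x else R) = s + 1 then (1 : Int) else 0)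
        + cntA xs (s + 1) (if x > R then x else R)

-- fold max
def fmx (l : List Int) (R : Int) : Int := l.foldl (fun r a => if a > r then a else r) R

lemma fmx_nil (R : Int) : fmx [] R = R := rfl

lemma fmx_cons (x : Int) (l : List Int) (R : Int) :
    fmx (x :: l) R = fmx l (if x > R then x else R) := rfl

lemma fmx_ge (l : List Int) : ∀ R : Int, R ≤ fmx l R := by
  induction l with
  | nil => intro R; simp [fmx_nil]
  | cons x l ih =>
    intro R
    rw [fmx_cons]
    refine le_trans ?_ (ih _)
    split <;> omega

lemma fmx_mem_le (l : List Int) : ∀ (R x : Int), x ∈ l → x ≤ fmx l R := by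
  induction l with
  | nil => intro R x hx; simp at hx
  | cons y l ih =>
    intro R x hx
    rw [fmx_cons]
    rcases List.mem_cons.1 hx with h | h
    · subst h
      refine le_trans ?_ (fmx_ge l _)
      split <;> omega
    · exact ih _ _ h

lemma fmx_cases (l : List Int) : ∀ R : Int, fmx l R = R ∨ fmx l R ∈ l := by
  induction l with
  | nil => intro R; left; rfl
  | cons x l ih =>
    intro R
    rw [fmx_cons]
    rcases ih (if x > R then x else R) with h | h
    · by_cases hx : x > R
      · right; rw [h, if_pos hx]; exact List.mem_cons_self
      · left; rw [h, if_neg hx]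
    · right; exact List.mem_cons_of_mem _ h

lemma fmx_le (l : List Int) : ∀ (R b : Int), R ≤ b → (∀ x ∈ l, x ≤ b) → fmx l R ≤ b := by
  induction l with
  | nil => intro R b h _; simpa [fmx_nil] using h
  | cons x l ih =>
    intro R b hR hall
    rw [fmx_cons]
    refine ih _ _ ?_ (fun y hy => hall y (List.mem_cons_of_mem _ hy))
    have := hall x List.mem_cons_self
    split <;> omega

-- A's fold equals cntA
lemma foldA (xs : List Int) : ∀ (s R C : Int),
    ((PySem.List.enumerate xs s).foldl
      (fun (st : Int × Int) (p : Int × Int) =>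
        let a := p.2
        let R := if a > st.1 then a else st.1
        (R, if R = p.1 + 1 then st.2 + 1 else st.2)) (R, C)).2
    = C + cntA xs s R := by
  induction xs with
  | nil => intro s R C; simp [PySem.List.enumerate_nil, cntA]
  | cons x xs ih =>
    intro x_1 R C
    rw [PySem.List.enumerate_cons, List.foldl_cons, cntA]
    simp only []
    rw [ih]
    split <;> omega

lemma solution_eq_cntA (A : List Int) : solution A = cntA A 0 (-1) := by
  have h := foldA A 0 (-1) 0
  rw [PySem.List.enumerate_eq_map_pyRange (d := 0), List.foldl_map] at h
  unfold solution
  simpa using h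

-- cntA as a sum over prefixes
lemma cntA_eq_sum (xs : List Int) : ∀ (s R : Int),
    cntA xs s R = ∑ i ∈ Finset.range xs.length,
      (if fmx (xs.take (i + 1)) R = s + (i : Int) + 1 then (1 : Int) else 0) := by
  induction xs with
  | nil => intro s R; simp [cntA]
  | cons x xs ih =>
    intro s R
    rw [cntA]
    simp only [List.length_cons]
    rw [Finset.sum_range_succ']
    rw [ih (s + 1) (if x > R then x else R)]
    have h1 : ∀ i ∈ Finset.range xs.length,
        (if fmx ((x :: xs).take (i + 1 + 1)) R = s + ((i + 1 : Nat) : Int) + 1 then (1 : Int) else 0)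
        = (if fmx (xs.take (i + 1)) (if x > R then x else R) = s + 1 + (i : Int) + 1 then (1 : Int) else 0) := by
      intro i _
      have ht : (x :: xs).take (i + 1 + 1) = x :: xs.take (i + 1) := rfl
      rw [ht, fmx_cons]
      have harith : s + ((i + 1 : Nat) : Int) + 1 = s + 1 + (i : Int) + 1 := by push_cast; ring
      rw [harith]
    rw [Finset.sum_congr rfl h1]
    simp only [List.take_succ_cons, List.take_zero, fmx_cons, fmx_nil, Nat.cast_zero, add_zero]
    ring

-- prefix-max characterization
lemma key_pm (A : List Int) (k : Nat) (h1 : 1 ≤ k) (h2 : k ≤ A.length) :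
    (fmx (A.take k) (-1) = (k : Int)) ↔
      ((∀ j < k, A.getD j 0 ≤ (k : Int)) ∧ ∃ j < k, A.getD j 0 = (k : Int)) := by
  have hlen : (A.take k).length = k := by simp [h2]
  have hmem : ∀ x : Int, x ∈ A.take k ↔ ∃ j < k, A.getD j 0 = x := by
    intro x
    rw [List.mem_iff_getElem]
    constructor
    · rintro ⟨j, hj, hx⟩
      rw [hlen] at hj
      refine ⟨j, hj, ?_⟩
      rw [List.getD_eq_getElem A 0 (by omega), ← hx, List.getElem_take]
    · rintro ⟨j, hj, hx⟩
      refine ⟨j, by omega, ?_⟩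
      rw [List.getElem_take, ← List.getD_eq_getElem A 0 (by omega), hx]
  constructor
  · intro h
    constructor
    · intro j hj
      have hm : A.getD j 0 ∈ A.take k := (hmem _).2 ⟨j, hj, rfl⟩
      have := fmx_mem_le (A.take k) (-1) _ hm
      omega
    · rcases fmx_cases (A.take k) (-1) with hc | hc
      · omega
      · rw [h] at hc
        exact (hmem _).1 hc
  · rintro ⟨hall, j, hj, hv⟩
    have hle : fmx (A.take k) (-1) ≤ (k : Int) := by
      refine fmx_le _ _ _ (by omega) ?_
      intro x hx
      rcases (hmem x).1 hx with ⟨j', hj', hx'⟩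
      have := hall j' hj'
      omega
    have hm : A.getD j 0 ∈ A.take k := (hmem _).2 ⟨j, hj, rfl⟩
    have hge := fmx_mem_le (A.take k) (-1) _ hm
    omega

-- interval indicator
def ind (A : List Int) (j k : Nat) : Int :=
  if (j : Int) + 1 ≤ (k : Int) ∧ (k : Int) ≤ min (A.getD j 0 - 1) (A.length : Int)
  then 1 else 0

lemma ind_succ (A : List Int) (j k : Nat) :
    ind A j (k + 1) = ind A j k + evd A j (k + 1) := by
  unfold ind evd
  push_cast
  split_ifs <;> omega

lemma active_eq (A : List Int) (k : Nat) :
    activeVal A k = ∑ j ∈ Finset.range A.length, ind A j k := by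
  induction k with
  | zero =>
    unfold activeVal
    rw [Finset.range_zero, Finset.sum_empty]
    refine (Finset.sum_eq_zero ?_).symm
    intro j _
    unfold ind
    split_ifs with h
    · exfalso; omega
    · rfl
  | succ k ih =>
    unfold activeVal at *
    rw [Finset.sum_range_succ, ih]
    unfold badVal
    rw [← Finset.sum_add_distrib]
    refine Finset.sum_congr rfl ?_
    intro j _
    rw [ind_succ]

lemma active_zero_iff (A : List Int) (k : Nat) (h2 : k ≤ A.length) :
    activeVal A k = 0 ↔ ∀ j < k, A.getD j 0 ≤ (k : Int) := by
  rw [active_eq]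
  rw [Finset.sum_eq_zero_iff_of_nonneg]
  · constructor
    · intro h j hj
      have hjN : j < A.length := by omega
      have hz := h j (Finset.mem_range.2 hjN)
      unfold ind at hz
      split_ifs at hz with hc
      · exact absurd hz (by norm_num)
      · rw [not_and] at hc
        have := hc (by omega)
        omega
    · intro h j _
      unfold ind
      split_ifs with hc
      · exfalso
        obtain ⟨hc1, hc2⟩ := hc
        have hjk : j < k := by omega
        have := h j hjk
        omega
      · rfl
  · intro j _
    unfold ind
    split_ifs <;> norm_num

lemma has_iff (A : List Int) (k : Nat) (h1 : 1 ≤ k) (h2 : k ≤ A.length) :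
    hasVal A A.length k = true ↔ ∃ j < k, A.getD j 0 = (k : Int) := by
  unfold hasVal
  rw [decide_eq_true_iff]
  constructor
  · rintro ⟨j, hj, _, _, hjv, hv⟩
    exact ⟨j, by omega, hv⟩
  · rintro ⟨j, hj, hv⟩
    exact ⟨j, by omega, by omega, by rw [hv]; omega, by omega, hv⟩

lemma badVal_succ (A : List Int) (t m : Nat) :
    badVal A (t + 1) m = badVal A t m + evd A t m := by
  unfold badVal
  rw [Finset.sum_range_succ]

lemma hasVal_succ (A : List Int) (t m : Nat) :
    hasVal A (t + 1) m
      = (hasVal A t m || decide (1 ≤ A.getD t 0 ∧ A.getD t 0 ≤ (A.length : Int) ∧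
          (t : Int) < A.getD t 0 ∧ A.getD t 0 = (m : Int))) := by
  unfold hasVal
  rw [← Bool.decide_or]
  rw [decide_eq_decide]
  constructor
  · rintro ⟨j, hj, hp⟩
    rcases Nat.lt_succ_iff_lt_or_eq.1 hj with h | h
    · exact Or.inl ⟨j, h, hp⟩
    · subst h; exact Or.inr hp
  · rintro (⟨j, hj, hp⟩ | hp)
    · exact ⟨j, by omega, hp⟩
    · exact ⟨t, by omega, hp⟩

-- one step of pass 1 preserves the invariant
-- one step of pass 1 preserves the invariant
lemma step1 (A : List Int) (t : Nat) (htN : t < A.length)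
    (bad : List Int) (has : List Bool)
    (hl1 : bad.length = A.length + 2) (hl2 : has.length = A.length + 1)
    (hb : ∀ m : Nat, m < A.length + 2 → PySem.List.pyGetD bad (m : Int) 0 = badVal A t m)
    (hh : ∀ m : Nat, m < A.length + 1 → PySem.List.pyGetD has (m : Int) false = hasVal A t m) :
    (let v := PySem.List.pyGetD A (t : Int) 0
     let has' := if 1 ≤ v ∧ v ≤ (A.length : Int) ∧ (t : Int) < v then PySem.List.pySetD has v true else has
     let lo := (t : Int) + 1
     let hi := min (v - 1) (A.length : Int)
     let bad' :=
       if lo ≤ hi then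
         let b1 := PySem.List.pySetD bad lo (PySem.List.pyGetD bad lo 0 + 1)
         PySem.List.pySetD b1 (hi + 1) (PySem.List.pyGetD b1 (hi + 1) 0 - 1)
       else bad
     bad'.length = A.length + 2 ∧ has'.length = A.length + 1 ∧
       (∀ m : Nat, m < A.length + 2 → PySem.List.pyGetD bad' (m : Int) 0 = badVal A (t + 1) m) ∧
       (∀ m : Nat, m < A.length + 1 → PySem.List.pyGetD has' (m : Int) false = hasVal A (t + 1) m)) := by
  simp only [PySem.List.pyGetD_natCast A t 0]
  set v := A.getD t 0 with hv
  have hHas : ∀ m : Nat, m < A.length + 1 →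
      PySem.List.pyGetD
        (if 1 ≤ v ∧ v ≤ (A.length : Int) ∧ (t : Int) < v then PySem.List.pySetD has v true else has)
        (m : Int) false = hasVal A (t + 1) m := by
    intro m hm
    rw [hasVal_succ, ← hv]
    by_cases hg2 : 1 ≤ v ∧ v ≤ (A.length : Int) ∧ (t : Int) < v
    · rw [if_pos hg2]
      obtain ⟨hvn, hhvn⟩ : ∃ hvn : Nat, v = (hvn : Int) :=
        ⟨v.toNat, (Int.toNat_of_nonneg (by omega)).symm⟩
      have hvnN : hvn < A.length + 1 := by omega
      rw [hhvn, PySem.List.pyGetD_pySetD_natCast _ hvn m _ _ (by omega)]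
      by_cases hmv : m = hvn
      · subst hmv
        rw [if_pos rfl]
        have hd : decide (1 ≤ (m : Int) ∧ (m : Int) ≤ (A.length : Int) ∧ (t : Int) < (m : Int) ∧ (m : Int) = (m : Int)) = true := by
          rw [decide_eq_true_iff]
          refine ⟨by omega, by omega, by omega, rfl⟩
        rw [hd, Bool.or_true]
      · rw [if_neg hmv, hh m hm]
        have hd : decide (1 ≤ (hvn : Int) ∧ (hvn : Int) ≤ (A.length : Int) ∧ (t : Int) < (hvn : Int) ∧ (hvn : Int) = (m : Int)) = false := by
          rw [decide_eq_false_iff_not]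
          rintro ⟨-, -, -, hvm⟩
          exact hmv (by omega)
        rw [hd, Bool.or_false]
    · rw [if_neg hg2, hh m hm]
      have hd : decide (1 ≤ v ∧ v ≤ (A.length : Int) ∧ (t : Int) < v ∧ v = (m : Int)) = false := by
        rw [decide_eq_false_iff_not]
        rintro ⟨h1, h2, h3, -⟩
        exact hg2 ⟨h1, h2, h3⟩
      rw [hd, Bool.or_false]
  have hHl : (if 1 ≤ v ∧ v ≤ (A.length : Int) ∧ (t : Int) < v then PySem.List.pySetD has v true else has).length
      = A.length + 1 := by
    split <;> simp [PySem.List.length_pySetD, hl2]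
  by_cases hg : (t : Int) + 1 ≤ min (v - 1) (A.length : Int)
  · -- the spoiled interval is nonempty
    obtain ⟨hn, hhn⟩ : ∃ hn : Nat, min (v - 1) (A.length : Int) = (hn : Int) :=
      ⟨(min (v - 1) (A.length : Int)).toNat, (Int.toNat_of_nonneg (by omega)).symm⟩
    have hhnN : hn ≤ A.length := by
      have := min_le_right (v - 1) ((A.length : Int))
      omega
    have hhnt : t + 1 ≤ hn := by omega
    have hcast1 : (t : Int) + 1 = ((t + 1 : Nat) : Int) := by push_cast; ring
    have hcast2 : min (v - 1) (A.length : Int) + 1 = ((hn + 1 : Nat) : Int) := by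
      rw [hhn]; push_cast; ring
    rw [if_pos hg]
    refine ⟨by simp [PySem.List.length_pySetD, hl1], hHl, ?_, hHas⟩
    intro m hm
    rw [hcast1, hcast2]
    rw [PySem.List.pyGetD_pySetD_natCast _ (hn + 1) m _ _
      (by rw [PySem.List.length_pySetD, hl1]; omega)]
    rw [PySem.List.pyGetD_pySetD_natCast _ (t + 1) (hn + 1) _ _ (by omega)]
    rw [PySem.List.pyGetD_pySetD_natCast _ (t + 1) m _ _ (by omega)]
    rw [hb (t + 1) (by omega), hb (hn + 1) (by omega), hb m hm]
    have hne : hn + 1 ≠ t + 1 := by omega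
    rw [if_neg hne]
    rw [badVal_succ]
    have hg' : (t : Int) + 1 ≤ (hn : Int) := by rw [← hhn]; exact hg
    have hevd : evd A t m = (if m = t + 1 then 1 else 0) - (if m = hn + 1 then 1 else 0) := by
      unfold evd
      rw [← hv, hhn]
      split_ifs <;> omega
    rw [hevd]
    by_cases h1 : m = hn + 1
    · subst h1
      rw [if_pos rfl, if_pos rfl, if_neg hne]
      ring
    · rw [if_neg h1, if_neg h1]
      by_cases h2 : m = t + 1
      · subst h2
        rw [if_pos rfl, if_pos rfl]
        ring
      · rw [if_neg h2, if_neg h2]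
        ring
  · -- empty interval: bad unchanged
    rw [if_neg hg]
    refine ⟨hl1, hHl, ?_, hHas⟩
    intro m hm
    rw [hb m hm, badVal_succ]
    have hevd : evd A t m = 0 := by
      unfold evd
      rw [← hv]
      rw [if_neg (fun h => hg h.1), if_neg (fun h => hg h.1)]
      ring
    rw [hevd, add_zero]
-- pass 1 invariant
lemma pass1 (A : List Int) (t : Nat) (ht : t ≤ A.length) :
    (let st := (PySem.List.pyRange 0 (t : Int) 1).foldl
      (fun (st : List Int × List Bool) (j : Int) =>
        let v := PySem.List.pyGetD A j 0
        let has := if 1 ≤ v ∧ v ≤ (A.length : Int) ∧ j < v then PySem.List.pySetD st.2 v true else st.2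
        let lo := j + 1
        let hi := min (v - 1) (A.length : Int)
        let bad :=
          if lo ≤ hi then
            let b1 := PySem.List.pySetD st.1 lo (PySem.List.pyGetD st.1 lo 0 + 1)
            PySem.List.pySetD b1 (hi + 1) (PySem.List.pyGetD b1 (hi + 1) 0 - 1)
          else st.1
        (bad, has))
      (List.replicate (A.length + 2) (0 : Int), List.replicate (A.length + 1) false)
    st.1.length = A.length + 2 ∧ st.2.length = A.length + 1 ∧
      (∀ m : Nat, m < A.length + 2 → PySem.List.pyGetD st.1 (m : Int) 0 = badVal A t m) ∧
      (∀ m : Nat, m < A.length + 1 → PySem.List.pyGetD st.2 (m : Int) false = hasVal A t m)) := by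
  induction t with
  | zero =>
    simp only [Nat.cast_zero, PySem.List.pyRange_one_eq_nil le_rfl, List.foldl_nil]
    refine ⟨by simp, by simp, ?_, ?_⟩
    · intro m hm
      rw [PySem.List.pyGetD_natCast, List.getD_replicate 0 hm]
      unfold badVal
      rw [Finset.range_zero, Finset.sum_empty]
    · intro m hm
      rw [PySem.List.pyGetD_natCast, List.getD_replicate false hm]
      unfold hasVal
      simp
  | succ t ih =>
    have hcast : ((t + 1 : Nat) : Int) = (t : Int) + 1 := by push_cast; ring
    rw [hcast, PySem.List.pyRange_one_succ_right (Int.natCast_nonneg t), List.foldl_append,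
      List.foldl_cons, List.foldl_nil]
    obtain ⟨hl1, hl2, hb, hh⟩ := ih (by omega)
    exact step1 A t (by omega) _ _ hl1 hl2 hb hh

-- pass 2 invariant
lemma pass2 (A : List Int) (bad : List Int) (has : List Bool)
    (hbad : ∀ m : Nat, m < A.length + 2 → PySem.List.pyGetD bad (m : Int) 0 = badVal A A.length m)
    (hhas : ∀ m : Nat, m < A.length + 1 → PySem.List.pyGetD has (m : Int) false = hasVal A A.length m)
    (k : Nat) (hk : k ≤ A.length) :
    (PySem.List.pyRange 1 ((k : Int) + 1) 1).foldl
      (fun (st : Int × Int) (k : Int) =>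
        let active := st.2 + PySem.List.pyGetD bad k 0
        (if active = 0 ∧ PySem.List.pyGetD has k false = true then st.1 + 1 else st.1, active))
      ((0 : Int), (0 : Int))
    = (countVal A k, activeVal A k) := by
  induction k with
  | zero =>
    simp only [Nat.cast_zero, zero_add, PySem.List.pyRange_one_eq_nil le_rfl, List.foldl_nil]
    unfold countVal activeVal
    rw [Finset.range_zero, Finset.sum_empty, Finset.sum_empty]
  | succ k ih =>
    have hcast : ((k + 1 : Nat) : Int) = (k : Int) + 1 := by push_cast; ring
    rw [hcast, PySem.List.pyRange_one_succ_right (by omega : (1 : Int) ≤ (k : Int) + 1),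
      List.foldl_append, List.foldl_cons, List.foldl_nil]
    rw [ih (by omega)]
    simp only []
    have hrb : PySem.List.pyGetD bad ((k : Int) + 1) 0 = badVal A A.length (k + 1) := by
      rw [show ((k : Int) + 1) = ((k + 1 : Nat) : Int) by push_cast; ring]
      exact hbad (k + 1) (by omega)
    have hrh : PySem.List.pyGetD has ((k : Int) + 1) false = hasVal A A.length (k + 1) := by
      rw [show ((k : Int) + 1) = ((k + 1 : Nat) : Int) by push_cast; ring]
      exact hhas (k + 1) (by omega)
    have hact : activeVal A k + badVal A A.length (k + 1) = activeVal A (k + 1) := by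
      unfold activeVal
      rw [Finset.sum_range_succ]
    rw [hrb, hrh, hact]
    have hcnt : (if activeVal A (k + 1) = 0 ∧ hasVal A A.length (k + 1) = true
        then countVal A k + 1 else countVal A k) = countVal A (k + 1) := by
      unfold countVal
      rw [Finset.sum_range_succ]
      split_ifs with h
      · rfl
      · rw [add_zero]
    rw [hcnt]

-- ===== VERDICT (by name: the statement is the Claim_ definition above) =====
theorem solution_spec : Claim_equal_solution := by
  intro A _
  unfold Spec_solution solution_alt
  simp only []
  obtain ⟨hl1, hl2, hb, hh⟩ := pass1 A A.length le_rfl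
  rw [pass2 A _ _ hb hh A.length le_rfl]
  rw [solution_eq_cntA, cntA_eq_sum]
  unfold countVal
  refine Finset.sum_congr rfl ?_
  intro i hi
  have hiN : i < A.length := Finset.mem_range.1 hi
  have e1 := key_pm A (i + 1) (by omega) (by omega)
  have e2 := active_zero_iff A (i + 1) (by omega)
  have e3 := has_iff A (i + 1) (by omega) (by omega)
  have harith : (0 : Int) + (i : Int) + 1 = ((i + 1 : Nat) : Int) := by push_cast; ring
  rw [harith]
  rw [if_congr (e1.trans (and_congr e2.symm e3.symm)) rfl rfl]
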